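-- pv_equiv track=rewrite | github.com/rojaswestall/cs337 | project1/utils.py | combine_adjacent_entities
-- ===== SOURCE A (Python) =====
-- def combine_adjacent_entities(entities):
--   new_entities = []
--
--   for i, entity in enumerate(entities):
--     current_type = entity[1]
--     current_name = entity[0]
--
--     # if the previous entity has the same type as the current entity
--     if len(new_entities) > 0 and entities[i-1][1] == current_type:
--       new_entities[-1] = (new_entities[-1][0] +' ' + current_name, current_type)
--     else:
--       new_entities.append(entity)
--
--   return new_entities
-- ===== SOURCE B (Python) =====
-- def combine_adjacent_entities(entities):
--   result = []
--   i = 0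
--   n = len(entities)
--   while i < n:
--     t = entities[i][1]
--     j = i + 1
--     while j < n and entities[j][1] == t:
--       j += 1
--     if j == i + 1:
--       result.append(entities[i])
--     else:
--       result.append((' '.join(e[0] for e in entities[i:j]), t))
--     i = j
--   return result
-- ===== Notes on version B (the rewrite author's own statement) =====
-- stated objective: alternative
-- what changed: B scans each maximal run of same-type entities with an inner loop and joins the run's names once, instead of A's enumerate-based fold that looks back at entities[i-1] and repeatedly rebuilds the last output slot.
import Mathlib
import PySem

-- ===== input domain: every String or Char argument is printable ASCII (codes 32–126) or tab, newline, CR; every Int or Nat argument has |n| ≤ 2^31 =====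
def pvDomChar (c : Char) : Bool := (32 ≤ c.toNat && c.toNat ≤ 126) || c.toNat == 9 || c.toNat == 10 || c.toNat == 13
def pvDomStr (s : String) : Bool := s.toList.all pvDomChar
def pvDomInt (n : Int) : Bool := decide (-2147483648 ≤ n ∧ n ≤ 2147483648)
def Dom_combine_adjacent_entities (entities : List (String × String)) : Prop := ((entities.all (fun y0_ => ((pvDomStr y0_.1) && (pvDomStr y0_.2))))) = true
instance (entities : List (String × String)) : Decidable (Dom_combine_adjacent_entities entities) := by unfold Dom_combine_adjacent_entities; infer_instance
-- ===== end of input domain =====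

-- B groups maximal same-type runs first and joins each run's names once ('simpler' decomposition),
-- instead of A's inline merge into the last output slot; both total, equivalence proved on all inputs.

-- ===== PORT A =====
-- the body of A's for-loop, one step of the fold (references the whole input list via entities[i-1])
def pvAstep (entities : List (String × String)) (new_entities : List (String × String))
    (p : Int × (String × String)) : List (String × String) :=
  let i := p.1
  let entity := p.2
  let current_type := entity.2
  let current_name := entity.1
  if 0 < new_entities.length ∧ (PySem.List.pyGet? entities (i - 1)).map Prod.snd = some current_type then
    -- new_entities[-1] = (new_entities[-1][0] + ' ' + current_name, current_type)
    -- exact: this branch only runs when new_entities is nonempty, so pyGetD's default is never read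
    new_entities.dropLast ++ [((PySem.List.pyGetD new_entities (-1) ("", "")).1 ++ " " ++ current_name, current_type)]
  else
    new_entities ++ [entity]

def combine_adjacent_entities (entities : List (String × String)) : List (String × String) :=
  (PySem.List.enumerate entities 0).foldl (pvAstep entities) []

-- ===== PORT B =====
-- inner while loop of B: scan off the run of entities whose type equals t (takeWhile/dropWhile = one scan)
def combine_adjacent_entities_alt (entities : List (String × String)) : List (String × String) :=
  match entities with
  | [] => []
  | e :: rest =>
    let g := rest.takeWhile (fun x => x.2 == e.2)
    let r := rest.dropWhile (fun x => x.2 == e.2)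
    (if g.isEmpty then e else (PySem.Str.join " " ((e :: g).map Prod.fst), e.2))
      :: combine_adjacent_entities_alt r
  termination_by entities.length
  decreasing_by
    simp only [List.length_cons]
    exact Nat.lt_succ_of_le (List.length_dropWhile_le _ _)

-- ===== PRECONDITION & SPEC =====
def Spec_combine_adjacent_entities (entities : List (String × String)) (out : List (String × String)) : Prop := out = combine_adjacent_entities_alt entities
instance (entities : List (String × String)) (out : List (String × String)) : Decidable (Spec_combine_adjacent_entities entities out) := by unfold Spec_combine_adjacent_entities; infer_instance

-- ===== CLAIM (what is proved, stated in full; the proofs are below) =====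
def Claim_equal_combine_adjacent_entities : Prop := ∀ (entities : List (String × String)), Dom_combine_adjacent_entities entities → Spec_combine_adjacent_entities entities (combine_adjacent_entities entities)

-- ===== LEMMAS AND PROOFS =====

-- common intermediate form: merge adjacent same-type entities, carrying the current merged slot
def pvMerge : (String × String) → List (String × String) → List (String × String)
  | cur, [] => [cur]
  | cur, e :: rest =>
    if e.2 = cur.2 then pvMerge (cur.1 ++ " " ++ e.1, cur.2) rest
    else cur :: pvMerge e rest

-- head entry B produces for the run cur :: g
def pvHead (cur : String × String) (g : List (String × String)) : String × String :=
  if g.isEmpty then cur else (PySem.Str.join " " ((cur :: g).map Prod.fst), cur.2)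

lemma pv_join_step (a b : String) (l : List String) :
    PySem.Str.join " " ((a ++ " " ++ b) :: l) = PySem.Str.join " " (a :: b :: l) := by
  apply String.toList_inj.mp
  cases l with
  | nil =>
      simp [PySem.Str.toList_join, PySem.Chars.join_singleton, PySem.Chars.join_cons_cons,
        String.toList_append]
  | cons x xs =>
      simp [PySem.Str.toList_join, PySem.Chars.join_cons_cons, String.toList_append]

lemma pvHead_merge (cur e : String × String) (g : List (String × String)) :
    pvHead (cur.1 ++ " " ++ e.1, cur.2) g = pvHead cur (e :: g) := by
  cases g with
  | nil =>
      simp only [pvHead, List.isEmpty_nil, List.isEmpty_cons, if_true, List.map]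
      rw [if_neg (by simp)]
      apply Prod.ext
      · apply String.toList_inj.mp
        simp [PySem.Str.toList_join, PySem.Chars.join_cons_cons, PySem.Chars.join_singleton,
          String.toList_append]
      · rfl
  | cons x xs =>
      simp [pvHead, pv_join_step]

-- B computes pvMerge, run by run
lemma alt_eq_merge : ∀ (rest : List (String × String)) (cur : String × String),
    pvMerge cur rest =
      pvHead cur (rest.takeWhile (fun x => x.2 == cur.2))
        :: combine_adjacent_entities_alt (rest.dropWhile (fun x => x.2 == cur.2)) := by
  intro rest
  induction rest with
  | nil =>
      intro cur
      rw [combine_adjacent_entities_alt.eq_def]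
      simp [pvMerge, pvHead]
  | cons e rest ih =>
      intro cur
      by_cases h : e.2 = cur.2
      · simp only [pvMerge, List.takeWhile, List.dropWhile, h, beq_self_eq_true]
        rw [ih (cur.1 ++ " " ++ e.1, cur.2), if_pos trivial]
        simp [pvHead_merge]
      · have hb : (e.2 == cur.2) = false := beq_eq_false_iff_ne.mpr h
        simp only [pvMerge, if_neg h, List.takeWhile, List.dropWhile, hb]
        rw [combine_adjacent_entities_alt.eq_def, ih e]
        simp only [pvHead, List.isEmpty_nil, if_true]

lemma alt_cons_eq_merge (e : String × String) (rest : List (String × String)) :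
    combine_adjacent_entities_alt (e :: rest) = pvMerge e rest := by
  rw [alt_eq_merge, combine_adjacent_entities_alt.eq_def]
  simp only [pvHead]

-- A's fold computes pvMerge: invariant — the accumulator is done ++ [cur] and the
-- element at index i - 1 of the input has cur's type
lemma a_loop (entities : List (String × String)) :
    ∀ (rest done : List (String × String)) (cur : String × String) (i : Nat),
      entities.drop i = rest → 1 ≤ i →
      (∃ p, entities[i - 1]? = some p ∧ p.2 = cur.2) →
      (PySem.List.enumerate rest (i : Int)).foldl (pvAstep entities) (done ++ [cur]) =
        done ++ pvMerge cur rest := by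
  intro rest
  induction rest with
  | nil => intro done cur i _ _ _; simp [PySem.List.enumerate, pvMerge]
  | cons e rest ih =>
      intro done cur i hdrop hi hp
      obtain ⟨p, hpget, hpty⟩ := hp
      have hie : entities[i]? = some e := by
        have h0 : (List.drop i entities)[0]? = entities[i + 0]? := List.getElem?_drop
        rw [hdrop] at h0
        simpa using h0.symm
      have hdrop' : entities.drop (i + 1) = rest := by
        have : List.drop 1 (entities.drop i) = List.drop 1 (e :: rest) := by rw [hdrop]
        simpa [List.drop_drop, Nat.add_comm] using this
      rw [PySem.List.enumerate_cons, List.foldl_cons]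
      have hidx : ((i : Int) - 1) = ((i - 1 : Nat) : Int) := by omega
      have hget : PySem.List.pyGet? entities ((i : Int) - 1) = some p := by
        rw [hidx, PySem.List.pyGet?_natCast, hpget]
      by_cases h : e.2 = cur.2
      · have hcond : pvAstep entities (done ++ [cur]) ((i : Int), e) =
            done ++ [(cur.1 ++ " " ++ e.1, e.2)] := by
          simp only [pvAstep, hget]
          rw [if_pos]
          · rw [List.dropLast_concat, PySem.List.pyGetD_neg_one_append_singleton]
          · constructor
            · simp
            · simp [hpty, h]
        rw [hcond]
        have : ((i : Int) + 1) = ((i + 1 : Nat) : Int) := by omega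
        rw [this, ih done (cur.1 ++ " " ++ e.1, e.2) (i + 1) hdrop' (by omega)
          ⟨e, by simpa using hie, rfl⟩]
        simp [pvMerge, h]
      · have hcond : pvAstep entities (done ++ [cur]) ((i : Int), e) =
            (done ++ [cur]) ++ [e] := by
          simp only [pvAstep]
          rw [if_neg]
          rintro ⟨-, hc⟩
          rw [hget] at hc
          simp at hc
          exact h (hc ▸ hpty)
        rw [hcond]
        have : ((i : Int) + 1) = ((i + 1 : Nat) : Int) := by omega
        rw [this, ih (done ++ [cur]) e (i + 1) hdrop' (by omega) ⟨e, by simpa using hie, rfl⟩]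
        simp [pvMerge, if_neg h]

lemma a_eq_merge (e : String × String) (rest : List (String × String)) :
    combine_adjacent_entities (e :: rest) = pvMerge e rest := by
  unfold combine_adjacent_entities
  rw [PySem.List.enumerate_cons, List.foldl_cons]
  have hstep : pvAstep (e :: rest) [] (0, e) = [e] := by
    simp [pvAstep]
  rw [hstep]
  have := a_loop (e :: rest) rest [] e 1 (by simp) (by omega) ⟨e, by simp, rfl⟩
  simpa using this

-- ===== VERDICT (by name: the statement is the Claim_ definition above) =====
theorem combine_adjacent_entities_spec : Claim_equal_combine_adjacent_entities := by
  intro entities _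
  unfold Spec_combine_adjacent_entities
  cases entities with
  | nil =>
      rw [combine_adjacent_entities_alt.eq_def]
      simp [combine_adjacent_entities, PySem.List.enumerate]
  | cons e rest => rw [a_eq_merge, alt_cons_eq_merge]
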